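-- pv_equiv track=rewrite | github.com/aoleiReiz/algo | algo/simple/11-15.py | classPhotos
-- ===== SOURCE A (Python) =====
-- def classPhotos(redShirtHeights, blueShirtHeights):
--     redShirtHeights = sorted(redShirtHeights, reverse=True)
--     blueShirtHeights = sorted(blueShirtHeights, reverse=True)
--     if len(redShirtHeights) != len(blueShirtHeights):
--         return False
--     if redShirtHeights:
--         firstRowColor = "RED" if redShirtHeights[0] < blueShirtHeights[0] else "BLUE"
--         for idx in range(len(redShirtHeights)):
--             if firstRowColor == "RED":
--                 if redShirtHeights[idx] >= blueShirtHeights[idx]: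
--                     return False
--             else:
--                 if blueShirtHeights[idx] >= redShirtHeights[idx]:
--                     return False
--     return True
-- ===== SOURCE B (Python) =====
-- def classPhotos(redShirtHeights, blueShirtHeights):
--     if len(redShirtHeights) != len(blueShirtHeights):
--         return False
--     redCount = {}
--     for h in redShirtHeights:
--         redCount[h] = redCount.get(h, 0) + 1
--     blueCount = {}
--     for h in blueShirtHeights:
--         blueCount[h] = blueCount.get(h, 0) + 1
--     redBack = True
--     blueBack = True
--     redBelow = 0
--     blueBelow = 0
--     for h in sorted(set(redCount) | set(blueCount)):
--         redUpto = redBelow + redCount.get(h, 0)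
--         blueUpto = blueBelow + blueCount.get(h, 0)
--         if redUpto > blueBelow:
--             redBack = False
--         if blueUpto > redBelow:
--             blueBack = False
--         redBelow = redUpto
--         blueBelow = blueUpto
--     return redBack or blueBack
-- ===== Notes on version B (the rewrite author's own statement) =====
-- stated objective: alternative
-- what changed: Replaces A's sort-both-lists-and-scan-paired-ranks loop (direction picked from index 0) with a counting sweep: build height->count dicts for each list, then one ascending pass over the distinct heights maintaining running prefix counts and checking the dominance condition count_back(<=h) <= count_front(<h) for both directions at once.
import Mathlib
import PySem

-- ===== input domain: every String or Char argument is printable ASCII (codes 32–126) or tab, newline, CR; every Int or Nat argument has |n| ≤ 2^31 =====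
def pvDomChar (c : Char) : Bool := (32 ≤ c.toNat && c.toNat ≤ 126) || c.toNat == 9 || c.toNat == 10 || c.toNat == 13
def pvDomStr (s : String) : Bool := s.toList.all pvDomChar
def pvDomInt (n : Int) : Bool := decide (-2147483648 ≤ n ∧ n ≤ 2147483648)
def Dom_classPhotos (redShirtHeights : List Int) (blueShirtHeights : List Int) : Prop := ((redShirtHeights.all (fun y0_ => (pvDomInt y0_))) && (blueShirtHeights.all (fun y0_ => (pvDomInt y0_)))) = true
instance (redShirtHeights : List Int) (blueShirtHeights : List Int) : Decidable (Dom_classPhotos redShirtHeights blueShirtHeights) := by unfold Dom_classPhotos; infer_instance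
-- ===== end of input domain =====

-- B replaces A's sort-and-pair scan with a counting sweep: height counters (dicts) and one
-- ascending pass over the distinct heights checking count_back(≤h) ≤ count_front(<h) in each
-- direction; return value only, same O(n log n) cost.
-- ===== PORT A =====
def classPhotosLoop (firstRowColor : String) (reds blues : List Int) : List Int → Bool
  | [] => true
  | idx :: rest =>
    if firstRowColor == "RED" then
      if PySem.List.pyGetD reds idx 0 ≥ PySem.List.pyGetD blues idx 0 then false
      else classPhotosLoop firstRowColor reds blues rest
    else
      if PySem.List.pyGetD blues idx 0 ≥ PySem.List.pyGetD reds idx 0 then false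
      else classPhotosLoop firstRowColor reds blues rest

def classPhotos (redShirtHeights : List Int) (blueShirtHeights : List Int) : Bool :=
  let reds := PySem.List.sorted redShirtHeights (fun x => x) true
  let blues := PySem.List.sorted blueShirtHeights (fun x => x) true
  if reds.length ≠ blues.length then false
  else if reds ≠ [] then
    let firstRowColor :=
      if PySem.List.pyGetD reds 0 0 < PySem.List.pyGetD blues 0 0 then "RED" else "BLUE"
    classPhotosLoop firstRowColor reds blues (PySem.List.pyRange 0 reds.length 1)
  else true

-- ===== PORT B =====
def classPhotosStep (redCount blueCount : PySem.Dict Int Int)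
    (s : Bool × Bool × Int × Int) (h : Int) : Bool × Bool × Int × Int :=
  let redUpto := s.2.2.1 + redCount.getD h 0
  let blueUpto := s.2.2.2 + blueCount.getD h 0
  (s.1 && !(redUpto > s.2.2.2), s.2.1 && !(blueUpto > s.2.2.1), redUpto, blueUpto)

def classPhotos_alt (redShirtHeights : List Int) (blueShirtHeights : List Int) : Bool :=
  if redShirtHeights.length ≠ blueShirtHeights.length then false
  else
    let redCount := redShirtHeights.foldl (fun d h => d.insert h (d.getD h 0 + 1)) PySem.Dict.empty
    let blueCount := blueShirtHeights.foldl (fun d h => d.insert h (d.getD h 0 + 1)) PySem.Dict.empty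
    let heights := PySem.List.sorted
      (PySem.Set.union (PySem.Set.ofList redCount.keys) (PySem.Set.ofList blueCount.keys))
      (fun x => x) false
    let st := heights.foldl (classPhotosStep redCount blueCount) (true, true, 0, 0)
    st.1 || st.2.1

-- ===== PRECONDITION & SPEC =====
def Spec_classPhotos (redShirtHeights : List Int) (blueShirtHeights : List Int) (out : Bool) : Prop := out = classPhotos_alt redShirtHeights blueShirtHeights
instance (redShirtHeights : List Int) (blueShirtHeights : List Int) (out : Bool) : Decidable (Spec_classPhotos redShirtHeights blueShirtHeights out) := by unfold Spec_classPhotos; infer_instance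

-- ===== CLAIM (what is proved, stated in full; the proofs are below) =====
def Claim_equal_classPhotos : Prop := ∀ (redShirtHeights : List Int) (blueShirtHeights : List Int), Dom_classPhotos redShirtHeights blueShirtHeights → Spec_classPhotos redShirtHeights blueShirtHeights (classPhotos redShirtHeights blueShirtHeights)

-- ===== LEMMAS AND PROOFS =====

def cntLE (l : List Int) (v : Int) : Nat := l.countP (fun x => decide (x ≤ v))
def cntLT (l : List Int) (v : Int) : Nat := l.countP (fun x => decide (x < v))

theorem countP_le_zip (P Q : Int → Bool) : ∀ (r b : List Int), r.length = b.length →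
    (∀ p ∈ r.zip b, P p.1 = true → Q p.2 = true) → r.countP P ≤ b.countP Q := by
  intro r
  induction r with
  | nil => intro b _ _; simp
  | cons x xs ih =>
    intro b hb hpq
    cases b with
    | nil => simp at hb
    | cons y ys =>
      simp only [List.zip_cons_cons, List.mem_cons] at hpq
      simp only [List.countP_cons]
      have := ih ys (by simpa using hb) (fun p hp => hpq p (Or.inr hp))
      by_cases hP : P x = true
      · have hQ := hpq (x, y) (Or.inl rfl) hP
        simp [hP, hQ]; omega
      · simp only [Bool.not_eq_true] at hP
        simp [hP]; omega

theorem cntLE_eq (l : List Int) (v : Int) : cntLE l v = cntLT l v + l.count v := by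
  induction l with
  | nil => simp [cntLE, cntLT]
  | cons x xs ih =>
    simp only [cntLE, cntLT, List.countP_cons, List.count_cons] at *
    by_cases h1 : x < v
    · simp [h1, le_of_lt h1, show ¬ x = v by omega, ih]; omega
    · by_cases h2 : x = v
      · simp [h2, ih]; omega
      · simp [h2, show ¬ x ≤ v by omega, ih]; omega


theorem countP_split (p : Int → Bool) (l : List Int) (i : Nat) :
    l.countP p = (l.take i).countP p + (l.drop i).countP p := by
  conv_lhs => rw [← List.take_append_drop i l]
  rw [List.countP_append]


theorem countP_congr_eq {l : List Int} {p q : Int → Bool} (h : ∀ x ∈ l, p x = q x) :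
    l.countP p = l.countP q :=
  List.countP_congr (fun x hx => by rw [h x hx])

-- zip dominance on equal-length desc-sorted lists ⇔ count condition
theorem zip_iff_cnt (rs bs : List Int) (hlen : rs.length = bs.length)
    (hr : rs.Pairwise (fun a b => b ≤ a)) (hb : bs.Pairwise (fun a b => b ≤ a)) :
    ((rs.zip bs).all (fun p => decide (p.2 < p.1)) = true) ↔ ∀ v, cntLE rs v ≤ cntLT bs v := by
  constructor
  · intro hall v
    apply countP_le_zip
    · exact hlen
    · intro p hp h1
      have := List.all_eq_true.mp hall p hp
      simp only [decide_eq_true_eq] at *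
      omega
  · intro hcnt
    by_contra hall
    obtain ⟨a, b, hmem, hab⟩ : ∃ a b, (a, b) ∈ rs.zip bs ∧ a ≤ b := by
      simpa using (List.all_eq_false.mp (Bool.eq_false_iff.mpr hall))
    obtain ⟨i, hi, hpi⟩ := List.mem_iff_getElem.mp hmem
    have hir : i < rs.length := by simp [List.length_zip] at hi; omega
    have hib : i < bs.length := by omega
    have hple : rs[i] ≤ bs[i] := by
      rw [List.getElem_zip] at hpi
      have h1 : rs[i] = a := congrArg Prod.fst hpi
      have h2 : bs[i] = b := congrArg Prod.snd hpi
      omega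
    have hrp := List.pairwise_iff_getElem.mp hr
    have hbp := List.pairwise_iff_getElem.mp hb
    have hlow : cntLE rs rs[i] ≥ rs.length - i := by
      have hsplit : rs = rs.take i ++ rs.drop i := (List.take_append_drop i rs).symm
      have hdrop : (rs.drop i).countP (fun x => decide (x ≤ rs[i])) = (rs.drop i).length := by
        apply List.countP_eq_length.mpr
        intro a ha
        obtain ⟨j, hj, hja⟩ := List.mem_iff_getElem.mp ha
        rw [List.getElem_drop] at hja
        subst hja
        simp only [decide_eq_true_eq]
        rcases Nat.eq_zero_or_pos j with hj0 | hj0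
        · simp [hj0]
        · exact hrp i (i + j) hir (by simp at hj; omega) (by omega)
      have hc : cntLE rs rs[i] = (rs.take i).countP (fun x => decide (x ≤ rs[i]))
          + (rs.drop i).countP (fun x => decide (x ≤ rs[i])) :=
        countP_split _ rs i
      have hdl : (rs.drop i).length = rs.length - i := by simp
      omega
    have hhigh : cntLT bs rs[i] ≤ bs.length - (i + 1) := by
      have hsplit : bs = bs.take (i + 1) ++ bs.drop (i + 1) := (List.take_append_drop (i + 1) bs).symm
      have htake : (bs.take (i + 1)).countP (fun x => decide (x < rs[i])) = 0 := by
        apply List.countP_eq_zero.mpr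
        intro a ha
        obtain ⟨j, hj, hja⟩ := List.mem_iff_getElem.mp ha
        rw [List.getElem_take] at hja
        subst hja
        simp only [List.length_take] at hj
        have hji : j ≤ i := by omega
        have : bs[i] ≤ bs[j] := by
          rcases Nat.lt_or_ge j i with hlt | hge
          · exact hbp j i (by omega) hib hlt
          · have : j = i := by omega
            subst this; exact le_refl _
        simp only [decide_eq_true_eq]
        omega
      have hc : cntLT bs rs[i] = (bs.take (i+1)).countP (fun x => decide (x < rs[i]))
          + (bs.drop (i+1)).countP (fun x => decide (x < rs[i])) :=
        countP_split _ bs (i+1)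
      have hd : (bs.drop (i+1)).countP (fun x => decide (x < rs[i])) ≤ (bs.drop (i+1)).length :=
        List.countP_le_length
      have hdl : (bs.drop (i+1)).length = bs.length - (i+1) := by simp
      omega
    have := hcnt rs[i]
    omega

theorem loop_red (reds blues : List Int) (idxs : List Int) :
    classPhotosLoop "RED" reds blues idxs
      = idxs.all (fun i => decide (PySem.List.pyGetD reds i 0 < PySem.List.pyGetD blues i 0)) := by
  induction idxs with
  | nil => rfl
  | cons i rest ih =>
    simp only [classPhotosLoop, List.all_cons, ih]
    rw [if_pos (show (("RED" : String) == "RED") = true from rfl)]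
    by_cases h : PySem.List.pyGetD reds i 0 ≥ PySem.List.pyGetD blues i 0
    · simp [h, not_lt_of_ge h]
    · simp [h, lt_of_not_ge h]

theorem loop_blue (reds blues : List Int) (idxs : List Int) :
    classPhotosLoop "BLUE" reds blues idxs
      = idxs.all (fun i => decide (PySem.List.pyGetD blues i 0 < PySem.List.pyGetD reds i 0)) := by
  induction idxs with
  | nil => rfl
  | cons i rest ih =>
    simp only [classPhotosLoop, List.all_cons, ih]
    rw [if_neg (show ¬ (("BLUE" : String) == "RED") = true by decide)]
    by_cases h : PySem.List.pyGetD blues i 0 ≥ PySem.List.pyGetD reds i 0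
    · simp [h, not_lt_of_ge h]
    · simp [h, lt_of_not_ge h]

theorem all_range_zip (p : Int → Int → Bool) :
    ∀ (r b : List Int), r.length = b.length →
      ((List.range r.length).all fun i => p (r.getD i 0) (b.getD i 0))
        = (r.zip b).all fun q => p q.1 q.2 := by
  intro r
  induction r with
  | nil => intro b _; simp
  | cons x xs ih =>
    intro b hb
    cases b with
    | nil => simp at hb
    | cons y ys =>
      simp only [List.length_cons] at hb
      have h := ih ys (by omega)
      simp only [List.length_cons, List.range_succ_eq_map, List.all_cons, List.all_map,
        List.zip_cons_cons, Function.comp_def, List.getD_cons_zero, List.getD_cons_succ]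
      rw [← h]

theorem all_pyrange_zip (p : Int → Int → Bool) (r b : List Int) (h : r.length = b.length) :
    ((PySem.List.pyRange 0 (r.length : Int) 1).all
        fun i => p (PySem.List.pyGetD r i 0) (PySem.List.pyGetD b i 0))
      = (r.zip b).all fun q => p q.1 q.2 := by
  rw [PySem.List.pyRange_one, List.all_map]
  simp only [zero_add, Int.sub_zero, Int.toNat_natCast, Function.comp_def,
    PySem.List.pyGetD_natCast]
  exact all_range_zip p r b h

theorem A_normal (red blue : List Int) :
    classPhotos red blue =
      (decide (red.length = blue.length) &&
        (((PySem.List.sorted red (fun x => x) true).zip (PySem.List.sorted blue (fun x => x) true)).all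
            (fun p => decide (p.2 < p.1)) ||
         ((PySem.List.sorted red (fun x => x) true).zip (PySem.List.sorted blue (fun x => x) true)).all
            (fun p => decide (p.1 < p.2)))) := by
  unfold classPhotos
  set rs := PySem.List.sorted red (fun x => x) true with hrs
  set bs := PySem.List.sorted blue (fun x => x) true with hbs
  have hlenr : rs.length = red.length := PySem.List.length_sorted ..
  have hlenb : bs.length = blue.length := PySem.List.length_sorted ..
  by_cases hlen : rs.length = bs.length
  · have hlen' : red.length = blue.length := by omega
    rw [if_neg (not_not_intro hlen)]
    simp only [hlen', decide_true, Bool.true_and]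
    by_cases hnil : rs = []
    · have hbnil : bs = [] :=
        List.eq_nil_of_length_eq_zero (by rw [hnil] at hlen; simpa using hlen.symm)
      rw [if_neg (not_not_intro hnil)]
      simp [hnil, hbnil]
    · obtain ⟨rh, rt, hrc⟩ := List.exists_cons_of_ne_nil hnil
      have hbnil : bs ≠ [] := by
        intro hx; rw [hx] at hlen; simp [hrc] at hlen
      obtain ⟨bh, bt, hbc⟩ := List.exists_cons_of_ne_nil hbnil
      rw [if_pos hnil]
      have hget0r : PySem.List.pyGetD rs 0 0 = rh := by rw [hrc]; simp
      have hget0b : PySem.List.pyGetD bs 0 0 = bh := by rw [hbc]; simp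
      by_cases hfirst : PySem.List.pyGetD rs 0 0 < PySem.List.pyGetD bs 0 0
      · rw [if_pos hfirst, loop_red,
          all_pyrange_zip (fun a b => decide (a < b)) rs bs hlen]
        have hno : ((rs.zip bs).all fun q => decide (q.2 < q.1)) = false := by
          rw [hrc, hbc]; simp only [List.zip_cons_cons, List.all_cons]
          rw [hget0r, hget0b] at hfirst
          simp [not_lt_of_gt hfirst]
        simp [hno]
      · rw [if_neg hfirst, loop_blue,
          all_pyrange_zip (fun a b => decide (b < a)) rs bs hlen]
        have hno : ((rs.zip bs).all fun q => decide (q.1 < q.2)) = false := by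
          rw [hrc, hbc]; simp only [List.zip_cons_cons, List.all_cons]
          rw [hget0r, hget0b] at hfirst
          simp [hfirst]
        simp [hno]
  · have hlen' : ¬ red.length = blue.length := by omega
    rw [if_pos (by omega : rs.length ≠ bs.length)]
    simp [hlen']

theorem step_fold (red blue : List Int) (redCount blueCount : PySem.Dict Int Int)
    (hrc : ∀ h, redCount.getD h 0 = (red.count h : Int))
    (hbc : ∀ h, blueCount.getD h 0 = (blue.count h : Int)) :
    ∀ (hs : List Int) (rB bB : Bool) (r b : Int),
    hs.Pairwise (· < ·) →
    (∀ x ∈ red, x ∈ hs ∨ hs.all (fun h' => decide (x < h')) = true) →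
    (∀ x ∈ blue, x ∈ hs ∨ hs.all (fun h' => decide (x < h')) = true) →
    r = (red.countP (fun x => hs.all (fun h' => decide (x < h'))) : Int) →
    b = (blue.countP (fun x => hs.all (fun h' => decide (x < h'))) : Int) →
    (hs.foldl (classPhotosStep redCount blueCount) (rB, bB, r, b)).1
      = (rB && decide (∀ h ∈ hs, cntLE red h ≤ cntLT blue h)) ∧
    (hs.foldl (classPhotosStep redCount blueCount) (rB, bB, r, b)).2.1
      = (bB && decide (∀ h ∈ hs, cntLE blue h ≤ cntLT red h)) := by
  intro hs
  induction hs with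
  | nil => intro rB bB r b _ _ _ _ _; simp
  | cons h rest ih =>
    intro rB bB r b hsort hmr hmb hr hb
    have hhlt : ∀ h' ∈ rest, h < h' := (List.pairwise_cons.mp hsort).1
    have hall_head : ∀ x : Int, ((h :: rest).all (fun h' => decide (x < h'))) = decide (x < h) := by
      intro x
      by_cases hx : x < h
      · simp only [List.all_cons, hx, decide_true, Bool.true_and]
        simp only [List.all_eq_true]
        have : ∀ h' ∈ rest, x < h' := fun h' hh' => lt_trans hx (hhlt h' hh')
        simp only [decide_eq_true_eq]
        exact fun h' hh' => this h' hh'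
      · simp [hx]
    have hrLT : r = (cntLT red h : Int) := by
      rw [hr]; congr 1
      exact countP_congr_eq (fun x _ => hall_head x)
    have hbLT : b = (cntLT blue h : Int) := by
      rw [hb]; congr 1
      exact countP_congr_eq (fun x _ => hall_head x)
    have hrUp : r + redCount.getD h 0 = (cntLE red h : Int) := by
      rw [hrLT, hrc, cntLE_eq]; push_cast; ring
    have hbUp : b + blueCount.getD h 0 = (cntLE blue h : Int) := by
      rw [hbLT, hbc, cntLE_eq]; push_cast; ring
    -- the fold step
    simp only [List.foldl_cons]
    have hstep : classPhotosStep redCount blueCount (rB, bB, r, b) h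
        = (rB && decide (cntLE red h ≤ cntLT blue h),
           bB && decide (cntLE blue h ≤ cntLT red h),
           (cntLE red h : Int), (cntLE blue h : Int)) := by
      unfold classPhotosStep
      simp only [hrUp, hbUp]
      congr 1
      · congr 1
        rw [hbLT]
        rw [show (!decide ((cntLE red h : Int) > (cntLT blue h : Nat)))
              = decide (cntLE red h ≤ cntLT blue h) by
          rcases Nat.lt_or_ge (cntLT blue h) (cntLE red h) with hlt | hge
          · simp [hlt]
          · simp [Nat.not_lt.mpr hge]; omega]
      · congr 1
        · rw [hrLT]
          rw [show (!decide ((cntLE blue h : Int) > (cntLT red h : Nat)))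
                = decide (cntLE blue h ≤ cntLT red h) by
            rcases Nat.lt_or_ge (cntLT red h) (cntLE blue h) with hlt | hge
            · simp [hlt]
            · simp [Nat.not_lt.mpr hge]; omega]
    rw [hstep]
    -- invariants for the tail
    have hcong : ∀ (l : List Int), (∀ x ∈ l, x ∈ h :: rest ∨ ((h :: rest).all (fun h' => decide (x < h'))) = true) →
        l.countP (fun x => rest.all (fun h' => decide (x < h'))) = cntLE l h := by
      intro l hm
      apply countP_congr_eq
      intro x hx
      have hxm := hm x hx
      show (rest.all (fun h' => decide (x < h'))) = decide (x ≤ h)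
      by_cases hxh : x ≤ h
      · simp only [hxh, decide_true, List.all_eq_true]
        intro h' hh'
        simp only [decide_eq_true_eq]
        exact lt_of_le_of_lt hxh (hhlt h' hh')
      · simp only [hxh, decide_false]
        rcases hxm with hin | hlt
        · rcases List.mem_cons.mp hin with rfl | hin'
          · omega
          · simp only [List.all_eq_false]
            exact ⟨x, hin', by simp⟩
        · rw [hall_head] at hlt
          simp at hlt; omega
    have hmr' : ∀ x ∈ red, x ∈ rest ∨ (rest.all (fun h' => decide (x < h'))) = true := by
      intro x hx
      rcases hmr x hx with hin | hlt
      · rcases List.mem_cons.mp hin with rfl | hin'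
        · right; simp only [List.all_eq_true]
          intro h' hh'; simp only [decide_eq_true_eq]; exact hhlt h' hh'
        · left; exact hin'
      · right
        rw [hall_head] at hlt
        simp only [decide_eq_true_eq] at hlt
        simp only [List.all_eq_true]
        intro h' hh'; simp only [decide_eq_true_eq]
        exact lt_trans hlt (hhlt h' hh')
    have hmb' : ∀ x ∈ blue, x ∈ rest ∨ (rest.all (fun h' => decide (x < h'))) = true := by
      intro x hx
      rcases hmb x hx with hin | hlt
      · rcases List.mem_cons.mp hin with rfl | hin'
        · right; simp only [List.all_eq_true]
          intro h' hh'; simp only [decide_eq_true_eq]; exact hhlt h' hh'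
        · left; exact hin'
      · right
        rw [hall_head] at hlt
        simp only [decide_eq_true_eq] at hlt
        simp only [List.all_eq_true]
        intro h' hh'; simp only [decide_eq_true_eq]
        exact lt_trans hlt (hhlt h' hh')
    have ihres := ih (rB && decide (cntLE red h ≤ cntLT blue h))
      (bB && decide (cntLE blue h ≤ cntLT red h))
      ((cntLE red h : Int)) ((cntLE blue h : Int))
      (List.pairwise_cons.mp hsort).2 hmr' hmb'
      (by rw [hcong red (fun x hx => hmr x hx)])
      (by rw [hcong blue (fun x hx => hmb x hx)])
    rw [ihres.1, ihres.2]
    constructor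
    · rw [Bool.and_assoc, ← Bool.decide_and]
      congr 1
      exact decide_eq_decide.mpr
        (List.forall_mem_cons (p := fun x => cntLE red x ≤ cntLT blue x)).symm
    · rw [Bool.and_assoc, ← Bool.decide_and]
      congr 1
      exact decide_eq_decide.mpr
        (List.forall_mem_cons (p := fun x => cntLE blue x ≤ cntLT red x)).symm

theorem pairwise_lt_of_le_nodup (l : List Int) (h1 : l.Pairwise (fun a b => a ≤ b))
    (h2 : l.Nodup) : l.Pairwise (· < ·) :=
  (h1.and h2).imp (fun ⟨hle, hne⟩ => lt_of_le_of_ne hle hne)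

theorem restrict_iff (l₁ l₂ hs : List Int) (hmem : ∀ x ∈ l₁, x ∈ hs) :
    (∀ h ∈ hs, cntLE l₁ h ≤ cntLT l₂ h) ↔ ∀ v, cntLE l₁ v ≤ cntLT l₂ v := by
  constructor
  · intro hh v
    rcases Nat.eq_zero_or_pos (cntLE l₁ v) with h0 | hpos
    · omega
    · have hne : l₁.filter (fun x => decide (x ≤ v)) ≠ [] := by
        rw [← List.length_pos_iff]
        unfold cntLE at hpos
        rwa [List.countP_eq_length_filter] at hpos
      obtain ⟨m, hm⟩ := Option.ne_none_iff_exists'.mp (mt List.max?_eq_none_iff.mp hne)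
      obtain ⟨hmmem, hmax⟩ := List.max?_eq_some_iff.mp hm
      have hmf := List.mem_filter.mp hmmem
      have hmv : m ≤ v := by simpa using hmf.2
      have h1 : cntLE l₁ v = cntLE l₁ m := by
        apply countP_congr_eq
        intro x hx
        by_cases hxv : x ≤ v
        · have : x ∈ l₁.filter (fun x => decide (x ≤ v)) := List.mem_filter.mpr ⟨hx, by simpa⟩
          have := hmax x this
          simp [hxv]; omega
        · have : ¬ x ≤ m := by omega
          simp [hxv, this]
      have h2 : cntLT l₂ m ≤ cntLT l₂ v :=
        List.countP_mono_left (fun x _ hx => by simp at hx ⊢; omega)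
      have := hh m (hmem m hmf.1)
      omega
  · intro hv h _
    exact hv h

theorem B_normal (red blue : List Int) :
    classPhotos_alt red blue = true ↔
      (red.length = blue.length ∧
        ((∀ v, cntLE red v ≤ cntLT blue v) ∨ (∀ v, cntLE blue v ≤ cntLT red v))) := by
  unfold classPhotos_alt
  by_cases hlen : red.length = blue.length
  · rw [if_neg (not_not_intro hlen)]
    simp only [hlen, true_and]
    set redCount := red.foldl (fun d h => d.insert h (d.getD h 0 + 1)) (PySem.Dict.empty : PySem.Dict Int Int) with hrcd
    set blueCount := blue.foldl (fun d h => d.insert h (d.getD h 0 + 1)) (PySem.Dict.empty : PySem.Dict Int Int) with hbcd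
    have hrc : ∀ h, redCount.getD h 0 = (red.count h : Int) := by
      intro h
      rw [hrcd, PySem.Dict.getD_foldl_insert_add_one, PySem.Dict.getD_empty]
      ring
    have hbc : ∀ h, blueCount.getD h 0 = (blue.count h : Int) := by
      intro h
      rw [hbcd, PySem.Dict.getD_foldl_insert_add_one, PySem.Dict.getD_empty]
      ring
    have hrkeys : redCount.keys = PySem.Set.ofList red := by
      rw [hrcd, PySem.Dict.keys_foldl_insert, PySem.Dict.keys_empty, PySem.Set.update_nil_left]
    have hbkeys : blueCount.keys = PySem.Set.ofList blue := by
      rw [hbcd, PySem.Dict.keys_foldl_insert, PySem.Dict.keys_empty, PySem.Set.update_nil_left]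
    set u := PySem.Set.union (PySem.Set.ofList redCount.keys) (PySem.Set.ofList blueCount.keys) with hu
    set hs := PySem.List.sorted u (fun x => x) false with hhs
    have hmemu : ∀ x : Int, x ∈ hs ↔ (x ∈ red ∨ x ∈ blue) := by
      intro x
      rw [hhs, PySem.List.mem_sorted, hu, hrkeys, hbkeys]
      rw [PySem.Set.mem_union]
      simp [PySem.Set.mem_ofList]
    have hnodup : hs.Nodup := by
      have : u.Nodup := PySem.Set.nodup_union _ _ (PySem.Set.nodup_ofList _)
      exact (PySem.List.sorted_perm u (fun x => x) false).nodup_iff.mpr this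
    have hsort : hs.Pairwise (· < ·) := by
      apply pairwise_lt_of_le_nodup _ _ hnodup
      have := PySem.List.sorted_pairwise u (fun x => x)
      exact this
    have hzero : ∀ l : List Int, (∀ x ∈ l, x ∈ hs) →
        (l.countP (fun x => hs.all (fun h' => decide (x < h'))) : Int) = 0 := by
      intro l hm
      simp only [Nat.cast_eq_zero]
      apply List.countP_eq_zero.mpr
      intro x hx
      simp only [Bool.not_eq_true]
      apply List.all_eq_false.mpr
      exact ⟨x, hm x hx, by simp⟩
    have hres := step_fold red blue redCount blueCount hrc hbc hs true true 0 0 hsort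
      (fun x hx => Or.inl ((hmemu x).mpr (Or.inl hx)))
      (fun x hx => Or.inl ((hmemu x).mpr (Or.inr hx)))
      ((hzero red (fun x hx => (hmemu x).mpr (Or.inl hx))).symm)
      ((hzero blue (fun x hx => (hmemu x).mpr (Or.inr hx))).symm)
    rw [hres.1, hres.2]
    simp only [Bool.true_and, Bool.or_eq_true, decide_eq_true_eq]
    rw [restrict_iff red blue hs (fun x hx => (hmemu x).mpr (Or.inl hx)),
        restrict_iff blue red hs (fun x hx => (hmemu x).mpr (Or.inr hx))]
  · rw [if_pos hlen]
    simp [hlen]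

theorem AB_eq (red blue : List Int) : classPhotos red blue = classPhotos_alt red blue := by
  rw [A_normal, Bool.eq_iff_iff, B_normal red blue]
  set rs := PySem.List.sorted red (fun x => x) true with hrs
  set bs := PySem.List.sorted blue (fun x => x) true with hbs
  have hpr := PySem.List.sorted_perm red (fun x => x) true
  have hpb := PySem.List.sorted_perm blue (fun x => x) true
  have hcr1 : ∀ v, cntLE rs v = cntLE red v := fun v => hpr.countP_eq _
  have hcr2 : ∀ v, cntLT rs v = cntLT red v := fun v => hpr.countP_eq _
  have hcb1 : ∀ v, cntLE bs v = cntLE blue v := fun v => hpb.countP_eq _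
  have hcb2 : ∀ v, cntLT bs v = cntLT blue v := fun v => hpb.countP_eq _
  have hrp : rs.Pairwise (fun a b => b ≤ a) := PySem.List.sorted_pairwise_rev red (fun x => x)
  have hbp : bs.Pairwise (fun a b => b ≤ a) := PySem.List.sorted_pairwise_rev blue (fun x => x)
  simp only [Bool.and_eq_true, Bool.or_eq_true, decide_eq_true_eq]
  apply and_congr_right
  intro hlen
  have hlen' : rs.length = bs.length := by
    rw [hrs, hbs, PySem.List.length_sorted, PySem.List.length_sorted, hlen]
  have hswap : ((rs.zip bs).all (fun p => decide (p.1 < p.2)))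
      = ((bs.zip rs).all (fun p => decide (p.2 < p.1))) := by
    rw [← List.zip_swap bs rs, List.all_map]
    rfl
  rw [hswap]
  apply or_congr
  · rw [zip_iff_cnt rs bs hlen' hrp hbp]
    constructor
    · intro h v; have := h v; rw [hcr1 v, hcb2 v] at this; exact this
    · intro h v; rw [hcr1 v, hcb2 v]; exact h v
  · rw [zip_iff_cnt bs rs hlen'.symm hbp hrp]
    constructor
    · intro h v; have := h v; rw [hcb1 v, hcr2 v] at this; exact this
    · intro h v; rw [hcb1 v, hcr2 v]; exact h v

-- ===== VERDICT (by name: the statement is the Claim_ definition above) =====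
theorem classPhotos_spec : Claim_equal_classPhotos := by
  intro red blue _
  unfold Spec_classPhotos
  exact AB_eq red blue
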